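-- pv_equiv track=rewrite | github.com/adeelkhan11/finance | finance/csvfile.py | check_order
-- ===== SOURCE A (Python) =====
-- def check_order(lst):
--     order = ''
--
--     prev = None
--     for a in lst:
--         if prev is not None and a > prev:
--             if order == 'descending':
--                 return 'unknown'
--             order = 'ascending'
--         elif prev is not None and a < prev:
--             if order == 'ascending':
--                 return 'unknown'
--             order = 'descending'
--         prev = a
--
--     return order
-- ===== SOURCE B (Python) =====
-- def check_order(lst):
--     pairs = list(zip(lst, lst[1:]))
--     has_asc = any(b > a for a, b in pairs)
--     has_desc = any(b < a for a, b in pairs)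
--     if has_asc and has_desc:
--         return 'unknown'
--     if has_asc:
--         return 'ascending'
--     if has_desc:
--         return 'descending'
--     return ''
-- ===== Notes on version B (the rewrite author's own statement) =====
-- stated objective: simpler
-- what changed: Replaced the stateful single-pass conflict detector (order string + prev + early return) with two aggregate any-scans over adjacent pairs followed by a four-way decision.
import Mathlib
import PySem

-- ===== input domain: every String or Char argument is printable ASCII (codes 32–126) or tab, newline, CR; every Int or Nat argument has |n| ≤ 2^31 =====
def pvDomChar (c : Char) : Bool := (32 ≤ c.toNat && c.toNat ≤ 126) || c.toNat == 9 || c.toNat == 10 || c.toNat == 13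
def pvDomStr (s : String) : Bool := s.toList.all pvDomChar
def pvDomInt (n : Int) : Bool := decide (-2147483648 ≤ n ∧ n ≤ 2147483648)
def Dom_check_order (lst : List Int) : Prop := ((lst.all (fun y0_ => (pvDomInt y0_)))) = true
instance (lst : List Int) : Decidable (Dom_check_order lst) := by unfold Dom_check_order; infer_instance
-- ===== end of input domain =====

-- B replaces A's stateful conflict-detecting loop with two any-scans over adjacent pairs
-- and a final decision (objective: simpler decomposition; same values everywhere).

-- ===== PORT A =====
-- the for-loop of A, carrying the `order` string and `prev` (Option = Python None)
def check_order_loop (lst : List Int) (order : String) (prev : Option Int) : String :=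
  match lst with
  | [] => order
  | a :: rest =>
    match prev with
    | none => check_order_loop rest order (some a)
    | some p =>
      if a > p then
        if order = "descending" then "unknown"
        else check_order_loop rest "ascending" (some a)
      else if a < p then
        if order = "ascending" then "unknown"
        else check_order_loop rest "descending" (some a)
      else check_order_loop rest order (some a)

def check_order (lst : List Int) : String :=
  check_order_loop lst "" none

-- ===== PORT B =====
def check_order_alt (lst : List Int) : String :=
  let pairs := lst.zip lst.tail
  let has_asc := pairs.any (fun pr => pr.2 > pr.1)
  let has_desc := pairs.any (fun pr => pr.2 < pr.1)
  if has_asc && has_desc then "unknown"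
  else if has_asc then "ascending"
  else if has_desc then "descending"
  else ""

-- ===== PRECONDITION & SPEC =====
def Spec_check_order (lst : List Int) (out : String) : Prop := out = check_order_alt lst
instance (lst : List Int) (out : String) : Decidable (Spec_check_order lst out) := by unfold Spec_check_order; infer_instance

-- ===== CLAIM (what is proved, stated in full; the proofs are below) =====
def Claim_equal_check_order : Prop := ∀ (lst : List Int), Dom_check_order lst → Spec_check_order lst (check_order lst)

-- ===== LEMMAS AND PROOFS =====

def hasAsc (lst : List Int) : Bool := (lst.zip lst.tail).any (fun pr => pr.2 > pr.1)
def hasDesc (lst : List Int) : Bool := (lst.zip lst.tail).any (fun pr => pr.2 < pr.1)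

lemma hasAsc_cons (p a : Int) (rs : List Int) :
    hasAsc (p :: a :: rs) = (decide (a > p) || hasAsc (a :: rs)) := by
  simp [hasAsc]

lemma hasDesc_cons (p a : Int) (rs : List Int) :
    hasDesc (p :: a :: rs) = (decide (a < p) || hasDesc (a :: rs)) := by
  simp [hasDesc]

lemma loop_asc (rest : List Int) : ∀ p : Int,
    check_order_loop rest "ascending" (some p) =
      if hasDesc (p :: rest) then "unknown" else "ascending" := by
  induction rest with
  | nil => intro p; simp [check_order_loop, hasDesc]
  | cons a rs ih =>
    intro p
    simp only [check_order_loop, hasDesc_cons]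
    by_cases h1 : a > p
    · have h2 : ¬ a < p := by omega
      simp [h1, h2, ih a]
    · by_cases h2 : a < p
      · simp [h1, h2]
      · have : a = p := by omega
        simp [h1, h2, ih a]

lemma loop_desc (rest : List Int) : ∀ p : Int,
    check_order_loop rest "descending" (some p) =
      if hasAsc (p :: rest) then "unknown" else "descending" := by
  induction rest with
  | nil => intro p; simp [check_order_loop, hasAsc]
  | cons a rs ih =>
    intro p
    simp only [check_order_loop, hasAsc_cons]
    by_cases h1 : a > p
    · simp [h1]
    · by_cases h2 : a < p
      · simp [h1, h2, ih a]
      · have : a = p := by omega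
        simp [h1, h2, ih a]

lemma loop_empty (rest : List Int) : ∀ p : Int,
    check_order_loop rest "" (some p) =
      if hasAsc (p :: rest) && hasDesc (p :: rest) then "unknown"
      else if hasAsc (p :: rest) then "ascending"
      else if hasDesc (p :: rest) then "descending"
      else "" := by
  induction rest with
  | nil => intro p; simp [check_order_loop, hasAsc, hasDesc]
  | cons a rs ih =>
    intro p
    simp only [check_order_loop, hasAsc_cons, hasDesc_cons]
    by_cases h1 : a > p
    · have h2 : ¬ a < p := by omega
      rw [loop_asc rs a]
      by_cases hd : hasDesc (a :: rs) = true <;> simp [h1, h2, hd]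
    · by_cases h2 : a < p
      · rw [loop_desc rs a]
        by_cases ha : hasAsc (a :: rs) = true <;> simp [h1, h2, ha]
      · have : a = p := by omega
        simp [h1, h2, ih a]

lemma alt_eq (lst : List Int) :
    check_order_alt lst =
      if hasAsc lst && hasDesc lst then "unknown"
      else if hasAsc lst then "ascending"
      else if hasDesc lst then "descending"
      else "" := by
  simp only [check_order_alt, hasAsc, hasDesc]
  rfl

-- ===== VERDICT (by name: the statement is the Claim_ definition above) =====
theorem check_order_spec : Claim_equal_check_order := by
  intro lst _
  unfold Spec_check_order
  cases lst with
  | nil => simp [check_order, check_order_loop, check_order_alt]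
  | cons a rest =>
    show check_order_loop rest "" (some a) = _
    rw [loop_empty rest a, alt_eq]
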